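-- pv_equiv track=rewrite | github.com/BalsRadu/AOC_2023 | Day18/lavaduct_lagoon.py | calculate_coordinates
-- ===== SOURCE A (Python) =====
-- def calculate_coordinates(instructions):
--     """ Calculate the coordinates for each instruction point. """
--     x, y = 0, 0  # Starting position
--     coordinates = [(x, y)]  # Starting point
--
--     # Process each instruction
--     for direction, distance in instructions:
--         if direction == 'R':
--             x += distance
--         elif direction == 'U':
--             y -= distance
--         elif direction == 'L':
--             x -= distance
--         elif direction == 'D':
--             y += distance
--
--         coordinates.append((x, y))
--
--     return coordinates
-- ===== SOURCE B (Python) =====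
-- _UNIT = {'R': (1, 0), 'U': (0, -1), 'L': (-1, 0), 'D': (0, 1)}
--
-- def _prefix(deltas):
--     """Divide-and-conquer prefix path: coordinates of the left half, then the
--     right half's path (computed relative to its own origin) translated by the
--     left half's endpoint."""
--     n = len(deltas)
--     if n == 0:
--         return [(0, 0)]
--     if n == 1:
--         return [(0, 0), deltas[0]]
--     mid = n // 2
--     left = _prefix(deltas[:mid])
--     lx, ly = left[-1]
--     right = _prefix(deltas[mid:])
--     return left + [(x + lx, y + ly) for x, y in right[1:]]
--
-- def calculate_coordinates(instructions):
--     """ Calculate the coordinates for each instruction point. """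
--     deltas = []
--     for direction, distance in instructions:
--         ux, uy = _UNIT.get(direction, (0, 0))
--         deltas.append((ux * distance, uy * distance))
--     return _prefix(deltas)
-- ===== Notes on version B (the rewrite author's own statement) =====
-- stated objective: alternative
-- what changed: Replaces A's single left-to-right running-sum loop by a divide-and-conquer path construction: instructions are mapped to delta vectors, the delta list is split in half, each half's path is computed recursively relative to its own origin, and the right half's path is translated by the left half's endpoint and concatenated.
import Mathlib
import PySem

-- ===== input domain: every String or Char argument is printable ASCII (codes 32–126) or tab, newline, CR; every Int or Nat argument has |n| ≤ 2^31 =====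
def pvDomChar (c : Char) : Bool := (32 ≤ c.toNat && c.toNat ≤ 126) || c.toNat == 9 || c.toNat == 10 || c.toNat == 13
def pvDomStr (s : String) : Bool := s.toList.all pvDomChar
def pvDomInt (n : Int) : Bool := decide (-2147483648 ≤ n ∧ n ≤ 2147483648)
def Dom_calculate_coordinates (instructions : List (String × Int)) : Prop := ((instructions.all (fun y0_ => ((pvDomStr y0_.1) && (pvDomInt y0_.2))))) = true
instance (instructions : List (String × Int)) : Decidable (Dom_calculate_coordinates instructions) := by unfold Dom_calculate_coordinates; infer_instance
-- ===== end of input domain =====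

-- B replaces A's left-to-right running-sum loop by a divide-and-conquer construction:
-- map instructions to deltas, split in half, build each half's path recursively and
-- translate the right half's path by the left half's endpoint; same result, alternative algorithm.

-- ===== PORT A =====
-- Python A: x,y = 0,0; coordinates=[(x,y)]; for each (direction,distance): if/elif update; append.
def calculate_coordinates (instructions : List (String × Int)) : List (Int × Int) :=
  let init : (Int × Int) × List (Int × Int) := ((0, 0), [(0, 0)])
  let r := instructions.foldl
    (fun (st : (Int × Int) × List (Int × Int)) ins =>
      let direction := ins.1
      let distance := ins.2
      let x := st.1.1
      let y := st.1.2
      let p :=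
        if direction == "R" then (x + distance, y)
        else if direction == "U" then (x, y - distance)
        else if direction == "L" then (x - distance, y)
        else if direction == "D" then (x, y + distance)
        else (x, y)
      (p, st.2 ++ [p])) init
  r.2

-- ===== PORT B =====
-- the direction → unit-vector dict of Source B
def pvUnitDict : PySem.Dict String (Int × Int) :=
  PySem.Dict.ofList [("R", (1, 0)), ("U", (0, -1)), ("L", (-1, 0)), ("D", (0, 1))]

-- Source B's _prefix: divide-and-conquer path of a delta list
def pvPrefix : List (Int × Int) → List (Int × Int)
  | [] => [(0, 0)]
  | [d] => [(0, 0), d]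
  | d1 :: d2 :: rest =>
    let l := d1 :: d2 :: rest
    let mid := l.length / 2
    let left := pvPrefix (l.take mid)
    let lp := left.getLastD (0, 0)
    let right := pvPrefix (l.drop mid)
    left ++ (right.tail.map (fun p => (p.1 + lp.1, p.2 + lp.2)))
  termination_by l => l.length
  decreasing_by
    · simp [List.length_take]; omega
    · simp [List.length_drop]; omega

def calculate_coordinates_alt (instructions : List (String × Int)) : List (Int × Int) :=
  let deltas := instructions.foldl (fun acc ins =>
    let u := pvUnitDict.getD ins.1 (0, 0)
    acc ++ [(u.1 * ins.2, u.2 * ins.2)]) []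
  pvPrefix deltas

-- ===== PRECONDITION & SPEC =====
def Spec_calculate_coordinates (instructions : List (String × Int)) (out : List (Int × Int)) : Prop := out = calculate_coordinates_alt instructions
instance (instructions : List (String × Int)) (out : List (Int × Int)) : Decidable (Spec_calculate_coordinates instructions out) := by unfold Spec_calculate_coordinates; infer_instance

-- ===== CLAIM (what is proved, stated in full; the proofs are below) =====
def Claim_equal_calculate_coordinates : Prop := ∀ (instructions : List (String × Int)), Dom_calculate_coordinates instructions → Spec_calculate_coordinates instructions (calculate_coordinates instructions)

-- ===== LEMMAS AND PROOFS =====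

-- abbreviation used only by the proofs: componentwise addition
def pvAdd (p q : Int × Int) : Int × Int := (p.1 + q.1, p.2 + q.2)

-- one step of A's if/elif chain equals adding the scaled unit vector of B
theorem pv_step_eq (d : String) (n : Int) (p : Int × Int) :
    (if d == "R" then (p.1 + n, p.2)
     else if d == "U" then (p.1, p.2 - n)
     else if d == "L" then (p.1 - n, p.2)
     else if d == "D" then (p.1, p.2 + n)
     else (p.1, p.2))
    = pvAdd p ((pvUnitDict.getD d (0, 0)).1 * n, (pvUnitDict.getD d (0, 0)).2 * n) := by
  have hR : pvUnitDict.getD "R" ((0:Int), (0:Int)) = (1, 0) := by decide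
  have hU : pvUnitDict.getD "U" ((0:Int), (0:Int)) = (0, -1) := by decide
  have hL : pvUnitDict.getD "L" ((0:Int), (0:Int)) = (-1, 0) := by decide
  have hD : pvUnitDict.getD "D" ((0:Int), (0:Int)) = (0, 1) := by decide
  by_cases h1 : d = "R"
  · subst h1; simp [hR, pvAdd]
  · by_cases h2 : d = "U"
    · subst h2; simp [hU, pvAdd]; ring
    · by_cases h3 : d = "L"
      · subst h3; simp [hL, pvAdd]; ring
      · by_cases h4 : d = "D"
        · subst h4; simp [hD, pvAdd]
        · have h0 : pvUnitDict.getD d ((0:Int), (0:Int)) = (0, 0) := by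
            simp [pvUnitDict, PySem.Dict.getD_eq_get?_getD, PySem.Dict.ofList,
              PySem.Dict.update, PySem.Dict.get?_insert_of_ne, PySem.Dict.get?_empty,
              h1, h2, h3, h4]
          simp [h1, h2, h3, h4, h0, pvAdd]

-- a scan is its start followed by its tail
theorem pv_scanl_head_tail (f : (Int × Int) → (Int × Int) → (Int × Int))
    (b : Int × Int) (l : List (Int × Int)) :
    b :: (List.scanl f b l).tail = List.scanl f b l := by
  cases l <;> simp [List.scanl_cons]

-- A's fold, started at any position p and accumulator acc, produces acc followed
-- by the tail of the prefix-sum scan started at p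
theorem pv_fold_eq (instructions : List (String × Int)) :
    ∀ (p : Int × Int) (acc : List (Int × Int)),
    (instructions.foldl
      (fun (st : (Int × Int) × List (Int × Int)) ins =>
        let direction := ins.1
        let distance := ins.2
        let x := st.1.1
        let y := st.1.2
        let q :=
          if direction == "R" then (x + distance, y)
          else if direction == "U" then (x, y - distance)
          else if direction == "L" then (x - distance, y)
          else if direction == "D" then (x, y + distance)
          else (x, y)
        (q, st.2 ++ [q])) (p, acc)).2
    = acc ++ (List.scanl pvAdd p
        (instructions.map (fun ins =>
          let u := pvUnitDict.getD ins.1 (0, 0)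
          (u.1 * ins.2, u.2 * ins.2)))).tail := by
  induction instructions with
  | nil => intro p acc; simp
  | cons hd tl ih =>
    intro p acc
    simp only [List.foldl_cons, List.map_cons, List.scanl_cons, List.tail_cons]
    rw [pv_step_eq hd.1 hd.2 p, ih]
    rw [List.append_assoc, List.singleton_append, pv_scanl_head_tail]

-- translating the start of a prefix-sum scan translates every point
theorem pv_scanl_shift (l : List (Int × Int)) :
    ∀ p : Int × Int, List.scanl pvAdd p l = (List.scanl pvAdd (0, 0) l).map (fun q => pvAdd q p) := by
  induction l with
  | nil => intro p; simp [pvAdd]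
  | cons d t ih =>
    intro p
    have hz : ∀ q : Int × Int, pvAdd (0, 0) q = q := by intro q; simp [pvAdd]
    simp only [List.scanl_cons, List.map_cons, hz]
    congr 1
    rw [ih (pvAdd p d), ih d, List.map_map]
    apply List.map_congr_left
    intro q _
    simp [pvAdd]; constructor <;> ring

-- the scan of an append splits at the fold of the first part
theorem pv_scanl_append (l1 : List (Int × Int)) :
    ∀ (b : Int × Int) (l2 : List (Int × Int)),
    List.scanl pvAdd b (l1 ++ l2)
      = List.scanl pvAdd b l1 ++ (List.scanl pvAdd (l1.foldl pvAdd b) l2).tail := by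
  induction l1 with
  | nil =>
    intro b l2
    simp only [List.nil_append, List.scanl_nil, List.foldl_nil, List.singleton_append]
    exact (pv_scanl_head_tail pvAdd b l2).symm
  | cons d t ih =>
    intro b l2
    simp only [List.cons_append, List.scanl_cons, List.foldl_cons, List.cons_append]
    rw [ih]

-- the last point of a prefix-sum scan is the fold of the deltas
theorem pv_scanl_getLastD (l : List (Int × Int)) :
    ∀ b x : Int × Int, (List.scanl pvAdd b l).getLastD x = l.foldl pvAdd b := by
  induction l with
  | nil => intro b x; simp
  | cons d t ih =>
    intro b x
    simp only [List.scanl_cons, List.foldl_cons, List.getLastD_cons]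
    exact ih (pvAdd b d) b

-- the divide-and-conquer path equals the prefix-sum scan
theorem pvPrefix_eq (l : List (Int × Int)) :
    pvPrefix l = List.scanl pvAdd (0, 0) l := by
  induction hn : l.length using Nat.strong_induction_on generalizing l with
  | _ n ih =>
    match l with
    | [] => simp [pvPrefix]
    | [d] => simp [pvPrefix, pvAdd]
    | d1 :: d2 :: rest =>
      rw [pvPrefix]
      have hlen : (d1 :: d2 :: rest).length = n := hn
      set L := d1 :: d2 :: rest with hL
      set mid := L.length / 2 with hmid
      have h2 : 2 ≤ L.length := by simp [hL]
      have hm1 : 1 ≤ mid := by omega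
      have hmlt : mid < L.length := by omega
      have htake : (L.take mid).length < n := by
        rw [← hlen]; simp [List.length_take]; omega
      have hdrop : (L.drop mid).length < n := by
        rw [← hlen]; simp [List.length_drop]; omega
      rw [ih _ htake _ rfl, ih _ hdrop _ rfl]
      rw [pv_scanl_getLastD (L.take mid) (0, 0) (0, 0)]
      have hsplit : L = L.take mid ++ L.drop mid := by simp
      conv_rhs => rw [hsplit]
      rw [pv_scanl_append]
      congr 1
      rw [pv_scanl_shift (L.drop mid) (List.foldl pvAdd (0, 0) (L.take mid))]
      rw [List.map_tail]
      simp [pvAdd]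

-- B's delta-building fold is the map of the delta function
theorem pv_deltas_eq (instructions : List (String × Int)) :
    ∀ acc : List (Int × Int),
    instructions.foldl (fun acc ins =>
      let u := pvUnitDict.getD ins.1 (0, 0)
      acc ++ [(u.1 * ins.2, u.2 * ins.2)]) acc
    = acc ++ instructions.map (fun ins =>
        let u := pvUnitDict.getD ins.1 (0, 0)
        (u.1 * ins.2, u.2 * ins.2)) := by
  induction instructions with
  | nil => intro acc; simp
  | cons hd tl ih => intro acc; simp [ih, List.append_assoc]

-- ===== VERDICT (by name: the statement is the Claim_ definition above) =====
theorem calculate_coordinates_spec : Claim_equal_calculate_coordinates := by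
  intro instructions _
  unfold Spec_calculate_coordinates calculate_coordinates calculate_coordinates_alt
  rw [pv_fold_eq, pv_deltas_eq, List.nil_append, pvPrefix_eq]
  rw [List.singleton_append, pv_scanl_head_tail]
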